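-- pv_equiv track=rewrite | github.com/itsecd/isb-2026 | lab1/lab1_task1/cipher.py | column_transposition_decipher
-- ===== SOURCE A (Python) =====
-- def column_transposition_decipher (text: str, key: str) -> str:
--     """
--     дешифрует текст, зашифрованный методом постолбцовой транспозиции
--     """
--     text = text.replace(" ", "")
--     n = len(key)
--     number_rows = len(text) // n
--
--     index_in_key = []
--     for i in range(n):
--         index_in_key.append((key[i], i))
--
--     index_in_key.sort()
--
--     alphabet_order = [0] * n
--     alphabet_number = 1
--     for pair in index_in_key:
--         position_in_key = pair[1]
--         alphabet_order[position_in_key] = alphabet_number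
--         alphabet_number += 1
--
--     alphabet_and_column = []
--     for i in range(n):
--         alphabet_and_column.append((alphabet_order[i], i))
--
--     alphabet_and_column.sort()
--
--     matrix = []
--     for i in range(number_rows):
--         matrix.append([''] * n)
--
--     current_index = 0
--     for pair in alphabet_and_column:
--         column_index = pair[1]
--         for row_index in range(number_rows):
--             matrix[row_index][column_index] = text[current_index]
--             current_index += 1
--
--     result = ""
--     for row in matrix:
--         result += "".join(row)
--
--     result = result.replace("_", " ").rstrip("")
--     return result
-- ===== SOURCE B (Python) =====
-- def column_transposition_decipher(text: str, key: str) -> str: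
--     """
--     дешифрует текст, зашифрованный методом постолбцовой транспозиции
--     (single stable sort of column indices + string slices instead of the
--     two-stage rank table and the character matrix)
--     """
--     text = text.replace(" ", "")
--     n = len(key)
--     number_rows = len(text) // n
--     order = sorted(range(n), key=lambda i: key[i])
--     columns = [""] * n
--     for idx, col in enumerate(order):
--         columns[col] = text[idx * number_rows:(idx + 1) * number_rows]
--     result = "".join(columns[col][row] for row in range(number_rows) for col in range(n))
--     return result.replace("_", " ")
-- ===== Notes on version B (the rewrite author's own statement) =====
-- stated objective: simpler
-- what changed: B replaces A's two sort passes over tuples, the rank table and the cell-by-cell character matrix with a single stable sort of the column indices and direct string slices, reading the result row-major in one join.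
import Mathlib
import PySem

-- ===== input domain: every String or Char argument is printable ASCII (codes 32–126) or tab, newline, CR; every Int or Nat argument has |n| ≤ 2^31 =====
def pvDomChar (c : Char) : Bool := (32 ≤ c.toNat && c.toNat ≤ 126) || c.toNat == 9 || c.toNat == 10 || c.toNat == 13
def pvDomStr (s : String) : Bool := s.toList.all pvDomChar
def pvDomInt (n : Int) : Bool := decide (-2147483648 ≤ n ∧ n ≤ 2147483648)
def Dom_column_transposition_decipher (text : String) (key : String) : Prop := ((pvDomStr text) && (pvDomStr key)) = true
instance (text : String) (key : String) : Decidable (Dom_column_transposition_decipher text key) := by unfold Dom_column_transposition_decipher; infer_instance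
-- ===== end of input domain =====

-- B replaces A's two-stage rank table and character matrix by one stable sort of the column
-- indices plus string slices; equivalence of the return values is proved below (no argument is
-- mutated by either program).

-- ===== PORT A =====
-- rstrip("") strips the (empty) set of characters from the right; ported by hand, exact.
def pyRstripChars (s : List Char) (chars : List Char) : List Char :=
  (s.reverse.dropWhile (fun c => chars.contains c)).reverse

-- Port of A.  The matrix cells (Python strings '' / one char) are List Char ([] = '', [c] = one
-- char), so ''.join(row) is row.flatten.  Python sorts the (char, index) tuples
-- lexicographically; the second components are the original positions, strictly increasing in
-- list order, so the stable sort by the first component is exact here; likewise the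
-- (rank, index) tuples have pairwise-distinct first components.
def column_transposition_decipher (text : String) (key : String) : String :=
  let t : List Char := PySem.Chars.replace text.toList [' '] []
  let n : Nat := key.toList.length
  let number_rows : Nat := t.length / n
  let index_in_key : List (Char × Nat) :=
    (List.range n).map (fun (i : Nat) => (PySem.List.pyGetD key.toList (i : Int) ' ', i))
  let index_sorted : List (Char × Nat) := PySem.List.sorted index_in_key (fun p => p.1)
  let alphabet_order : List Nat :=
    (index_sorted.foldl (fun (st : List Nat × Nat) pair =>
        (st.1.set pair.2 st.2, st.2 + 1)) (List.replicate n 0, 1)).1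
  let alphabet_and_column : List (Nat × Nat) :=
    (List.range n).map (fun i => (alphabet_order.getD i 0, i))
  let ac_sorted : List (Nat × Nat) := PySem.List.sorted alphabet_and_column (fun p => p.1)
  let filled : List (List (List Char)) × Nat :=
    ac_sorted.foldl (fun (st : List (List (List Char)) × Nat) pair =>
        (List.range number_rows).foldl (fun (st2 : List (List (List Char)) × Nat) row_index =>
            (st2.1.set row_index
              ((st2.1.getD row_index []).set pair.2 [PySem.List.pyGetD t (st2.2 : Int) ' ']),
             st2.2 + 1)) st)
      (List.replicate number_rows (List.replicate n ([] : List Char)), 0)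
  let result : List Char := filled.1.foldl (fun acc row => acc ++ row.flatten) []
  String.ofList (pyRstripChars (PySem.Chars.replace result ['_'] [' ']) [])

-- ===== PORT B =====
def column_transposition_decipher_alt (text : String) (key : String) : String :=
  let t : List Char := PySem.Chars.replace text.toList [' '] []
  let n : Nat := key.toList.length
  let number_rows : Nat := t.length / n
  let order : List Nat :=
    PySem.List.sorted (List.range n) (fun i => PySem.List.pyGetD key.toList (i : Int) ' ')
  let columns : List (List Char) :=
    (order.zipIdx).foldl (fun (cols : List (List Char)) (p : Nat × Nat) =>
        cols.set p.1 (PySem.List.slice t (some ((p.2 * number_rows : Nat) : Int))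
                                         (some (((p.2 + 1) * number_rows : Nat) : Int))))
      (List.replicate n [])
  let result : List Char :=
    (List.range number_rows).flatMap (fun (row : Nat) =>
      (List.range n).map (fun (col : Nat) => PySem.List.pyGetD (columns.getD col []) (row : Int) ' '))
  String.ofList (PySem.Chars.replace result ['_'] [' '])

-- ===== PRECONDITION & SPEC =====
-- An empty key makes A divide by len(key) = 0 (ZeroDivisionError); B raises there too.
def Pre_column_transposition_decipher (text : String) (key : String) : Prop := key ≠ ""
instance (text : String) (key : String) : Decidable (Pre_column_transposition_decipher text key) := by unfold Pre_column_transposition_decipher; infer_instance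
def pvWitness_column_transposition_decipher : String × String := ("nlnirguea_r", "key")

def Spec_column_transposition_decipher (text : String) (key : String) (out : String) : Prop := out = column_transposition_decipher_alt text key
instance (text : String) (key : String) (out : String) : Decidable (Spec_column_transposition_decipher text key out) := by unfold Spec_column_transposition_decipher; infer_instance

-- ===== CLAIM (what is proved, stated in full; the proofs are below) =====
def Claim_equal_column_transposition_decipher : Prop := ∀ (text : String) (key : String), Dom_column_transposition_decipher text key → Pre_column_transposition_decipher text key → Spec_column_transposition_decipher text key (column_transposition_decipher text key)

-- ===== LEMMAS AND PROOFS =====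

theorem insertBy_map {α β : Type} (g : α → β) (before : β → β → Bool) (x : α) (ys : List α) :
    PySem.List.insertBy before (g x) (ys.map g)
      = (PySem.List.insertBy (fun a b => before (g a) (g b)) x ys).map g := by
  induction ys with
  | nil => simp [PySem.List.insertBy]
  | cons y ys ih =>
    simp only [List.map_cons, PySem.List.insertBy]
    by_cases h : before (g x) (g y) <;> simp [h, ih]

theorem foldl_insertBy_map {α β : Type} (g : α → β) (bf : β → β → Bool)
    (xs : List α) (acc : List α) :
    xs.foldl (fun acc x => PySem.List.insertBy bf (g x) acc) (acc.map g)
      = (xs.foldl (fun acc x => PySem.List.insertBy (fun a b => bf (g a) (g b)) x acc) acc).map g := by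
  induction xs generalizing acc with
  | nil => rfl
  | cons x xs ih =>
    simp only [List.foldl_cons]
    rw [insertBy_map, ih]

theorem sorted_map {α β κ : Type} [LT κ] [DecidableLT κ] (g : α → β) (xs : List α) (key : β → κ) :
    PySem.List.sorted (xs.map g) key = (PySem.List.sorted xs (fun a => key (g a))).map g := by
  unfold PySem.List.sorted
  simp only [Bool.false_eq_true, if_false]
  rw [List.foldl_map]
  exact foldl_insertBy_map g (fun a b => decide (key a < key b)) xs []

theorem getD_set {α : Type} (l : List α) (i c : Nat) (v d : α) :
    (l.set i v).getD c d = if i = c ∧ i < l.length then v else l.getD c d := by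
  rw [List.getD_eq_getElem?_getD, List.getD_eq_getElem?_getD, List.getElem?_set]
  by_cases hic : i = c
  · subst hic
    by_cases hl : i < l.length
    · simp [hl]
    · rw [if_pos rfl, if_neg hl, if_neg (fun h => hl h.2), List.getElem?_eq_none (by omega)]
  · simp [hic]

theorem setRanks (os : List Nat) :
    ∀ (lst : List Nat) (cnt : Nat), os.Nodup → (∀ x ∈ os, x < lst.length) →
    ∀ c : Nat,
      (os.foldl (fun (st : List Nat × Nat) i => (st.1.set i st.2, st.2 + 1)) (lst, cnt)).1.getD c 0
        = if c ∈ os then cnt + os.idxOf c else lst.getD c 0 := by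
  induction os with
  | nil => intro lst cnt _ _ c; simp
  | cons a os ih =>
    intro lst cnt hnd hb c
    obtain ⟨hna, hnd'⟩ := List.nodup_cons.mp hnd
    have hal : a < lst.length := hb a (List.mem_cons_self ..)
    simp only [List.foldl_cons]
    rw [ih (lst.set a cnt) (cnt + 1) hnd'
        (fun x hx => by simpa using hb x (List.mem_cons_of_mem a hx)) c]
    by_cases hc : c ∈ os
    · have hca : a ≠ c := fun h => hna (h ▸ hc)
      rw [if_pos hc, if_pos (List.mem_cons_of_mem a hc), List.idxOf_cons]
      simp only [beq_eq_false_iff_ne.mpr hca, cond_false]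
      omega
    · by_cases hca : c = a
      · subst hca
        rw [if_neg hc, if_pos (List.mem_cons_self ..), getD_set,
          if_pos ⟨rfl, hal⟩, List.idxOf_cons]
        simp
      · rw [if_neg hc, if_neg (by simp [hc, hca]), getD_set,
          if_neg (by exact fun h => hca h.1.symm)]

theorem colWrite (t : List Char) (c0 : Nat) (m : Nat) (M : List (List (List Char))) (cur : Nat)
    (hm : m ≤ M.length) :
    ((List.range m).foldl (fun (st2 : List (List (List Char)) × Nat) r =>
        (st2.1.set r ((st2.1.getD r []).set c0 [PySem.List.pyGetD t (st2.2 : Int) ' ']), st2.2 + 1))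
      (M, cur)).2 = cur + m
    ∧ ((List.range m).foldl (fun (st2 : List (List (List Char)) × Nat) r =>
        (st2.1.set r ((st2.1.getD r []).set c0 [PySem.List.pyGetD t (st2.2 : Int) ' ']), st2.2 + 1))
      (M, cur)).1.length = M.length
    ∧ ∀ r : Nat,
      ((List.range m).foldl (fun (st2 : List (List (List Char)) × Nat) r =>
        (st2.1.set r ((st2.1.getD r []).set c0 [PySem.List.pyGetD t (st2.2 : Int) ' ']), st2.2 + 1))
      (M, cur)).1.getD r []
        = if r < m then (M.getD r []).set c0 [PySem.List.pyGetD t ((cur + r : Nat) : Int) ' ']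
          else M.getD r [] := by
  induction m with
  | zero => simp
  | succ m ih =>
    obtain ⟨ih2, ihlen, ihget⟩ := ih (by omega)
    rw [List.range_succ]
    simp only [List.foldl_append, List.foldl_cons, List.foldl_nil]
    refine ⟨by rw [ih2]; omega, by rw [List.length_set, ihlen], fun r => ?_⟩
    rw [getD_set]
    by_cases hrm : r = m
    · subst hrm
      rw [if_pos ⟨rfl, by rw [ihlen]; omega⟩, if_pos (by omega), ihget r, if_neg (by omega), ih2]
    · rw [if_neg (by exact fun h => hrm h.1.symm), ihget r]
      by_cases hr : r < m
      · rw [if_pos hr, if_pos (by omega)]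
      · rw [if_neg hr, if_neg (by omega)]

theorem matFold (t : List Char) (rows ncols : Nat) (os : List Nat) :
    ∀ (M : List (List (List Char))) (cur : Nat), os.Nodup → (∀ x ∈ os, x < ncols) →
    M.length = rows → (∀ row ∈ M, row.length = ncols) →
    (os.foldl (fun (st : List (List (List Char)) × Nat) c =>
        (List.range rows).foldl (fun (st2 : List (List (List Char)) × Nat) r =>
            (st2.1.set r ((st2.1.getD r []).set c [PySem.List.pyGetD t (st2.2 : Int) ' ']), st2.2 + 1)) st)
      (M, cur)).1.length = rows
    ∧ (∀ row ∈ (os.foldl (fun (st : List (List (List Char)) × Nat) c =>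
        (List.range rows).foldl (fun (st2 : List (List (List Char)) × Nat) r =>
            (st2.1.set r ((st2.1.getD r []).set c [PySem.List.pyGetD t (st2.2 : Int) ' ']), st2.2 + 1)) st)
      (M, cur)).1, row.length = ncols)
    ∧ ∀ r < rows, ∀ c : Nat,
      (((os.foldl (fun (st : List (List (List Char)) × Nat) c =>
        (List.range rows).foldl (fun (st2 : List (List (List Char)) × Nat) r =>
            (st2.1.set r ((st2.1.getD r []).set c [PySem.List.pyGetD t (st2.2 : Int) ' ']), st2.2 + 1)) st)
      (M, cur)).1.getD r []).getD c [])
        = if c ∈ os then [PySem.List.pyGetD t ((cur + os.idxOf c * rows + r : Nat) : Int) ' ']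
          else (M.getD r []).getD c [] := by
  induction os with
  | nil =>
    intro M cur _ _ hM hrows
    exact ⟨by simpa using hM, by simpa using hrows, fun r hr c => by simp⟩
  | cons c0 os ih =>
    intro M cur hnd hb hM hrows
    obtain ⟨hnc0, hnd'⟩ := List.nodup_cons.mp hnd
    have hc0 : c0 < ncols := hb c0 (List.mem_cons_self ..)
    simp only [List.foldl_cons]
    obtain ⟨hw2, hwlen, hwget⟩ := colWrite t c0 rows M cur hM.ge
    have hMr : ∀ r, r < rows → (M.getD r []).length = ncols := by
      intro r hr
      rw [List.getD_eq_getElem _ _ (by omega)]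
      exact hrows _ (List.getElem_mem _)
    have hrowlen : ∀ row ∈ ((List.range rows).foldl (fun (st2 : List (List (List Char)) × Nat) r =>
        (st2.1.set r ((st2.1.getD r []).set c0 [PySem.List.pyGetD t (st2.2 : Int) ' ']), st2.2 + 1))
        (M, cur)).1, row.length = ncols := by
      intro row hrow
      obtain ⟨r, hr, hrw⟩ := List.mem_iff_getElem.mp hrow
      have hrr : r < rows := by rw [hwlen, hM] at hr; exact hr
      rw [← hrw, ← List.getD_eq_getElem _ [] hr, hwget r, if_pos hrr, List.length_set]
      exact hMr r hrr
    obtain ⟨hl, hrl, hg⟩ := ih _ _ hnd'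
      (fun x hx => hb x (List.mem_cons_of_mem c0 hx)) (hwlen.trans hM) hrowlen
    refine ⟨hl, hrl, fun r hr c => ?_⟩
    rw [hg r hr c]
    by_cases hc : c ∈ os
    · have hcc0 : c0 ≠ c := fun h => hnc0 (h ▸ hc)
      rw [if_pos hc, if_pos (List.mem_cons_of_mem c0 hc), List.idxOf_cons]
      simp only [beq_eq_false_iff_ne.mpr hcc0, cond_false]
      rw [hw2]
      have harith : cur + rows + List.idxOf c os * rows + r
          = cur + (List.idxOf c os + 1) * rows + r := by
        rw [add_mul, one_mul]; omega
      rw [harith]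
    · by_cases hcc : c = c0
      · subst hcc
        rw [if_neg hc, hwget r, if_pos hr, getD_set,
          if_pos ⟨rfl, by rw [hMr r hr]; exact hc0⟩, if_pos (List.mem_cons_self ..),
          List.idxOf_cons]
        simp
      · rw [if_neg hc, if_neg (by simp [hc, hcc]), hwget r, if_pos hr, getD_set,
          if_neg (fun h => hcc h.1.symm)]

theorem colsFold {α : Type} (sl : Nat → α) (d : α) (os : List Nat) :
    ∀ (s : Nat) (cols : List α), os.Nodup → (∀ x ∈ os, x < cols.length) →
    ∀ c : Nat,
      ((os.zipIdx s).foldl (fun (acc : List α) (p : Nat × Nat) => acc.set p.1 (sl p.2)) cols).getD c d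
        = if c ∈ os then sl (s + os.idxOf c) else cols.getD c d := by
  induction os with
  | nil => intro s cols _ _ c; simp
  | cons a os ih =>
    intro s cols hnd hb c
    obtain ⟨hna, hnd'⟩ := List.nodup_cons.mp hnd
    have hal : a < cols.length := hb a (List.mem_cons_self ..)
    simp only [List.zipIdx_cons, List.foldl_cons]
    rw [ih (s + 1) (cols.set a (sl s)) hnd'
        (fun x hx => by simpa using hb x (List.mem_cons_of_mem a hx)) c]
    by_cases hc : c ∈ os
    · have hca : a ≠ c := fun h => hna (h ▸ hc)
      rw [if_pos hc, if_pos (List.mem_cons_of_mem a hc), List.idxOf_cons]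
      simp only [beq_eq_false_iff_ne.mpr hca, cond_false]
      congr 1
      omega
    · by_cases hca : c = a
      · subst hca
        rw [if_neg hc, if_pos (List.mem_cons_self ..), getD_set,
          if_pos ⟨rfl, hal⟩, List.idxOf_cons]
        simp
      · rw [if_neg hc, if_neg (by simp [hc, hca]), getD_set,
          if_neg (by exact fun h => hca h.1.symm)]

theorem flatten_map_singleton {α β : Type} (l : List α) (f : α → β) :
    (l.map (fun x => [f x])).flatten = l.map f := by
  induction l with
  | nil => rfl
  | cons x l ih => simp [ih]

theorem foldl_append_flatten {α : Type} (L : List (List (List α))) :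
    ∀ init : List α, L.foldl (fun acc row => acc ++ row.flatten) init = init ++ (L.map List.flatten).flatten := by
  induction L with
  | nil => simp
  | cons r L ih => intro init; simp [ih]

theorem dropWhile_false {α : Type} (l : List α) :
    l.dropWhile (fun _ => false) = l := by
  induction l with
  | nil => rfl
  | cons x l ih => simp

theorem pyRstripChars_nil (s : List Char) : pyRstripChars s [] = s := by
  unfold pyRstripChars
  rw [show (fun c => (([] : List Char)).contains c) = (fun _ : Char => false) from rfl,
    dropWhile_false, List.reverse_reverse]

-- ===== VERDICT (by name: the statement is the Claim_ definition above) =====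
theorem column_transposition_decipher_spec : Claim_equal_column_transposition_decipher := by
  intro text key _ hpre
  unfold Spec_column_transposition_decipher
  simp only [column_transposition_decipher, column_transposition_decipher_alt]
  rw [pyRstripChars_nil]
  congr 1
  set k : List Char := key.toList with hkdef
  set t : List Char := PySem.Chars.replace text.toList [' '] [] with htdef
  set n : Nat := k.length with hndef
  set rows : Nat := t.length / n with hrowsdef
  set order : List Nat := PySem.List.sorted (List.range n) (fun i => PySem.List.pyGetD k (i : Int) ' ') with horderdef
  have hn : 0 < n := by
    rw [hndef, hkdef]
    refine List.length_pos_iff.mpr (fun h => hpre ?_)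
    unfold Pre_column_transposition_decipher at *
    exact String.ext h
  have hperm : order.Perm (List.range n) := PySem.List.sorted_perm _ _ _
  have hlen : order.length = n := by simpa using hperm.length_eq
  have hnodup : order.Nodup := hperm.nodup_iff.mpr (List.nodup_range)
  have hmem : ∀ c, c ∈ order ↔ c < n := fun c => by rw [hperm.mem_iff, List.mem_range]
  have hlt : ∀ x ∈ order, x < n := fun x hx => (hmem x).mp hx
  have hidx : ∀ c, c < n → List.idxOf c order < n :=
    fun c hc => hlen ▸ List.idxOf_lt_length_iff.mpr ((hmem c).mpr hc)
  -- Step 1: the sorted (char, index) list is the index-sort mapped back to pairs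
  have hIS : (PySem.List.sorted (List.map (fun (i : Nat) => (PySem.List.pyGetD k (i : Int) ' ', i)) (List.range n)) fun p => p.1)
      = List.map (fun (i : Nat) => (PySem.List.pyGetD k (i : Int) ' ', i)) order := by
    rw [sorted_map]
  rw [hIS, List.foldl_map]
  dsimp only
  -- Step 2: the rank table maps a column c to 1 + its position in `order`
  have hAOmap : List.map (fun i => ((List.foldl (fun (st : List Nat × Nat) i => (st.1.set i st.2, st.2 + 1)) (List.replicate n 0, 1) order).1.getD i 0, i)) (List.range n)
      = List.map (fun i => (1 + List.idxOf i order, i)) (List.range n) := by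
    apply List.map_congr_left
    intro i hi
    rw [setRanks order (List.replicate n 0) 1 hnodup (by intro x hx; simpa using hlt x hx) i,
      if_pos ((hmem i).mpr (List.mem_range.mp hi))]
  rw [hAOmap]
  -- Step 3: sorting the (rank, column) pairs lists the columns in `order` order
  have hACS : (PySem.List.sorted (List.map (fun i => (1 + List.idxOf i order, i)) (List.range n)) fun p => p.1)
      = List.map (fun j => (1 + j, order.getD j 0)) (List.range n) := by
    apply PySem.List.sorted_eq_of_perm_of_pairwise_lt
    · have h1 : List.map (fun j => (1 + j, order.getD j 0)) (List.range n)
          = List.map (fun i => (1 + List.idxOf i order, i)) order := by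
        apply List.ext_getElem (by simp [hlen])
        intro j hj1 hj2
        have hjo : j < order.length := by simpa using hj2
        simp only [List.getElem_map, List.getElem_range]
        rw [List.getD_eq_getElem order 0 hjo, hnodup.idxOf_getElem j hjo]
      rw [h1]
      exact hperm.map _
    · rw [List.pairwise_map]
      exact (List.pairwise_lt_range).imp (by intro a b h; simpa using h)
  rw [hACS, List.foldl_map]
  dsimp only
  -- Step 4: the matrix-filling fold, re-indexed as a fold over `order`
  have hordermapeq : List.map (fun j => order.getD j 0) (List.range n) = order := by
    apply List.ext_getElem (by simp [hlen])
    intro j h1 h2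
    simp only [List.getElem_map, List.getElem_range]
    exact List.getD_eq_getElem order 0 (by simpa using h2)
  have hfold2 : List.foldl (fun (st : List (List (List Char)) × Nat) j => List.foldl (fun st2 row_index => (st2.1.set row_index ((st2.1.getD row_index []).set (order.getD j 0) [PySem.List.pyGetD t (↑st2.2) ' ']), st2.2 + 1)) st (List.range rows)) (List.replicate rows (List.replicate n []), 0) (List.range n)
      = List.foldl (fun (st : List (List (List Char)) × Nat) c => List.foldl (fun st2 row_index => (st2.1.set row_index ((st2.1.getD row_index []).set c [PySem.List.pyGetD t (↑st2.2) ' ']), st2.2 + 1)) st (List.range rows)) (List.replicate rows (List.replicate n []), 0) order := by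
    conv_rhs => rw [← hordermapeq]
    rw [List.foldl_map]
  rw [hfold2]
  obtain ⟨hflen, hfrows, hfget⟩ := matFold t rows n order
    (List.replicate rows (List.replicate n ([] : List Char))) 0 hnodup hlt (by simp)
    (by intro row hrow; rw [List.eq_of_mem_replicate hrow]; simp)
  -- Step 5: the filled matrix, row by row
  have hF1 : (List.foldl (fun (st : List (List (List Char)) × Nat) c => List.foldl (fun st2 row_index => (st2.1.set row_index ((st2.1.getD row_index []).set c [PySem.List.pyGetD t (↑st2.2) ' ']), st2.2 + 1)) st (List.range rows)) (List.replicate rows (List.replicate n []), 0) order).1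
      = List.map (fun r => List.map (fun c => [PySem.List.pyGetD t (↑(List.idxOf c order * rows + r) : Int) ' ']) (List.range n)) (List.range rows) := by
    apply List.ext_getElem (by rw [hflen]; simp)
    intro r hr1 hr2
    have hrr : r < rows := by rwa [hflen] at hr1
    apply List.ext_getElem (by rw [hfrows _ (List.getElem_mem hr1)]; simp)
    intro c hc1 hc2
    have hcn : c < n := by rwa [hfrows _ (List.getElem_mem hr1)] at hc1
    rw [← List.getD_eq_getElem _ ([] : List Char) hc1,
      ← List.getD_eq_getElem _ ([] : List (List Char)) hr1,
      hfget r hrr c, if_pos ((hmem c).mpr hcn)]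
    simp [List.getElem_map, List.getElem_range]
  rw [foldl_append_flatten, hF1, List.nil_append, List.map_map]
  -- Step 6: B's columns array holds, at c, the slice for c's position in `order`
  have hColsGet : ∀ c, c < n → (List.foldl (fun (cols : List (List Char)) (p : Nat × Nat) => cols.set p.1 (PySem.List.slice t (some (↑(p.2 * rows) : Int)) (some (↑((p.2 + 1) * rows) : Int)))) (List.replicate n []) order.zipIdx).getD c []
      = PySem.List.slice t (some (↑(List.idxOf c order * rows) : Int)) (some (↑((List.idxOf c order + 1) * rows) : Int)) := by
    intro c hc
    have h0 := colsFold (fun j => PySem.List.slice t (some (↑(j * rows) : Int)) (some (↑((j + 1) * rows) : Int))) ([] : List Char) order 0 (List.replicate n []) hnodup (by intro x hx; simpa using hlt x hx) c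
    rw [if_pos ((hmem c).mpr hc)] at h0
    simpa using h0
  -- Step 7: pointwise agreement of the two readouts
  have hmul : rows * n ≤ t.length := by rw [hrowsdef]; exact Nat.div_mul_le_self _ _
  rw [List.flatMap_def]
  congr 1
  apply congrArg List.flatten
  apply List.map_congr_left
  intro r hrm
  have hrr : r < rows := List.mem_range.mp hrm
  rw [Function.comp_apply, flatten_map_singleton]
  apply List.map_congr_left
  intro c hcm
  have hcn : c < n := List.mem_range.mp hcm
  rw [hColsGet c hcn, PySem.List.slice_natCast, PySem.List.pyGetD_natCast, PySem.List.pyGetD_natCast]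
  have hba : (List.idxOf c order + 1) * rows - List.idxOf c order * rows = rows := by
    rw [add_mul, one_mul]; omega
  rw [hba]
  have hlt1 : List.idxOf c order * rows + rows ≤ t.length := by
    have h1 : (List.idxOf c order + 1) * rows ≤ n * rows :=
      Nat.mul_le_mul_right rows (hidx c hcn)
    rw [add_mul, one_mul] at h1
    have h2 : n * rows ≤ t.length := by rw [Nat.mul_comm]; exact hmul
    omega
  rw [List.getD_eq_getElem t ' ' (by omega),
    List.getD_eq_getElem _ ' ' (by simp [List.length_take, List.length_drop]; omega)]
  simp [List.getElem_take, List.getElem_drop]
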